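-- pv_equiv track=rewrite | github.com/kawaemon/stk | src/vm/register_map.py | masks
-- ===== SOURCE A (Python) =====
-- UNKNOWN_BIT_REPR = "x"
--
-- UNIMPLEMENTED_BIT_REPR = "-"
--
-- DEPENDS_ON_CONDITION_REPR = "q"
--
-- BINARY_LITERAL_HEADER = "0b"
--
-- INITIAL_BIT_FOR_UNIMPLEMENTED = "0"
--
-- INITIAL_BIT_FOR_UNKNOWN = "0"
--
-- INITIAL_BIT_FOR_DEPENDS_ON_CONDITION = "0"
--
-- def _4bit_align(s):
--     left = len(BINARY_LITERAL_HEADER) + 4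
--     return s[:left] + "_" + s[left:]
--
-- def masks(raw):
--     unimplemented = BINARY_LITERAL_HEADER
--     unknown = BINARY_LITERAL_HEADER
--     initial = BINARY_LITERAL_HEADER
--     depends_on_condition = BINARY_LITERAL_HEADER
--     for c in raw:
--         if c == UNKNOWN_BIT_REPR:
--             unimplemented += "0"
--             unknown += "1"
--             depends_on_condition += "0"
--             initial += INITIAL_BIT_FOR_UNKNOWN
--         elif c == UNIMPLEMENTED_BIT_REPR:
--             unimplemented += "1"
--             unknown += "0"
--             depends_on_condition += "0"
--             initial += INITIAL_BIT_FOR_UNIMPLEMENTED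
--         elif c == DEPENDS_ON_CONDITION_REPR:
--             unimplemented += "0"
--             unknown += "0"
--             initial += INITIAL_BIT_FOR_DEPENDS_ON_CONDITION
--             depends_on_condition += "1"
--         elif c == "0" or c == "1":
--             unimplemented += "0"
--             unknown += "0"
--             initial += c
--             depends_on_condition += "0"
--         else:
--             raise Exception(f"unknown repr: {c}")
--
--     res = " ".join([_4bit_align(initial), _4bit_align(unimplemented), _4bit_align(unknown)])
--     if depends_on_condition != "0b00000000":
--         res += f" // NOTE: {_4bit_align(depends_on_condition)} depends on condition"
--
--     return res
-- ===== SOURCE B (Python) =====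
-- def masks(raw):
--     for c in raw:
--         if c not in "x-q01":
--             raise Exception(f"unknown repr: {c}")
--     initial = "0b" + raw.translate(str.maketrans("x-q", "000"))
--     unimplemented = "0b" + "".join("1" if c == "-" else "0" for c in raw)
--     unknown = "0b" + "".join("1" if c == "x" else "0" for c in raw)
--     depends = "0b" + "".join("1" if c == "q" else "0" for c in raw)
--     align = lambda s: s[:6] + "_" + s[6:]
--     res = f"{align(initial)} {align(unimplemented)} {align(unknown)}"
--     if depends == "0b00000000":
--         return res
--     return res + f" // NOTE: {align(depends)} depends on condition"
-- ===== Notes on version B (the rewrite author's own statement) =====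
-- stated objective: idiomatic
-- what changed: A's single fused loop carrying four growing accumulator strings is replaced by a validation pass followed by four independent per-character translation passes (str.translate / indicator joins) assembled at the end.
import Mathlib
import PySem

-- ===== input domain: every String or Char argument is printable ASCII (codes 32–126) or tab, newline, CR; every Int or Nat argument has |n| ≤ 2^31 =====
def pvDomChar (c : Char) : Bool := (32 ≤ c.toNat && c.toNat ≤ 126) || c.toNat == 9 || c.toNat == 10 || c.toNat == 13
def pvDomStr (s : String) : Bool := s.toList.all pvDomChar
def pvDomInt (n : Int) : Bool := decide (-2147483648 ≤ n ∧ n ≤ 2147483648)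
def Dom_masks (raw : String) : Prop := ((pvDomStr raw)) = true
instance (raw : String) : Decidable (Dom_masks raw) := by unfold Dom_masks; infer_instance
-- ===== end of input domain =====

-- B replaces A's fused four-accumulator classification loop by a validation pass plus four
-- independent per-character translation passes (more idiomatic decomposition; no speed claim).

-- shared helper: _4bit_align (s[:6] + "_" + s[6:], both slice bounds nonneg and exact as take/drop)
def pvAlign4 (s : List Char) : List Char := s.take 6 ++ ['_'] ++ s.drop 6

-- ===== PORT A =====
-- the for-loop of A; the final else-branch raises in Python (excluded by Pre_masks),
-- here it returns the state unchanged.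
def masksLoop : List Char → List Char → List Char → List Char → List Char →
    List Char × List Char × List Char × List Char
  | [], un, uk, ini, dep => (un, uk, ini, dep)
  | c :: cs, un, uk, ini, dep =>
    if c = 'x' then masksLoop cs (un ++ ['0']) (uk ++ ['1']) (ini ++ ['0']) (dep ++ ['0'])
    else if c = '-' then masksLoop cs (un ++ ['1']) (uk ++ ['0']) (ini ++ ['0']) (dep ++ ['0'])
    else if c = 'q' then masksLoop cs (un ++ ['0']) (uk ++ ['0']) (ini ++ ['0']) (dep ++ ['1'])
    else if c = '0' ∨ c = '1' then masksLoop cs (un ++ ['0']) (uk ++ ['0']) (ini ++ [c]) (dep ++ ['0'])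
    else (un, uk, ini, dep)

def masks (raw : String) : String :=
  let st := masksLoop raw.toList ['0','b'] ['0','b'] ['0','b'] ['0','b']
  let res := pvAlign4 st.2.2.1 ++ [' '] ++ pvAlign4 st.1 ++ [' '] ++ pvAlign4 st.2.1
  String.ofList (if st.2.2.2 ≠ ['0','b','0','0','0','0','0','0','0','0'] then
    res ++ (" // NOTE: ".toList ++ pvAlign4 st.2.2.2 ++ " depends on condition".toList)
  else res)

-- ===== PORT B =====
-- initial: translate table maps x,-,q to '0', passes 0/1 through
def pvTrInit (c : Char) : Char := if c = 'x' ∨ c = '-' ∨ c = 'q' then '0' else c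
-- the three indicator passes ('1' iff c equals the marker)
def pvTrBit (t : Char) (c : Char) : Char := if c = t then '1' else '0'

-- the validation pass of B raises in Python exactly on the inputs Pre_masks excludes,
-- so it contributes nothing to the returned value and is not materialised here.
def masks_alt (raw : String) : String :=
  let cs := raw.toList
  let initial := ['0','b'] ++ cs.map pvTrInit
  let unimplemented := ['0','b'] ++ cs.map (pvTrBit '-')
  let unknown := ['0','b'] ++ cs.map (pvTrBit 'x')
  let depends := ['0','b'] ++ cs.map (pvTrBit 'q')
  let res := pvAlign4 initial ++ [' '] ++ pvAlign4 unimplemented ++ [' '] ++ pvAlign4 unknown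
  String.ofList (if depends = ['0','b','0','0','0','0','0','0','0','0'] then res
    else res ++ (" // NOTE: ".toList ++ pvAlign4 depends ++ " depends on condition".toList))

-- ===== PRECONDITION & SPEC =====
-- Pre_ excludes exactly the inputs containing a character other than x, -, q, 0 or 1, on which
-- A raises Exception("unknown repr: …") (B raises there too).
def Pre_masks (raw : String) : Prop :=
  (raw.toList.all (fun c => c ∈ ['x', '-', 'q', '0', '1'])) = true
instance (raw : String) : Decidable (Pre_masks raw) := by unfold Pre_masks; infer_instance
def pvWitness_masks : String := "xq01-xq0"

def Spec_masks (raw : String) (out : String) : Prop := out = masks_alt raw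
instance (raw : String) (out : String) : Decidable (Spec_masks raw out) := by unfold Spec_masks; infer_instance

-- ===== CLAIM (what is proved, stated in full; the proofs are below) =====
def Claim_equal_masks : Prop := ∀ (raw : String), Dom_masks raw → Pre_masks raw → Spec_masks raw (masks raw)

-- ===== LEMMAS AND PROOFS =====

theorem masksLoop_eq (cs : List Char)
    (h : ∀ c ∈ cs, c = 'x' ∨ c = '-' ∨ c = 'q' ∨ c = '0' ∨ c = '1') :
    ∀ un uk ini dep, masksLoop cs un uk ini dep =
      (un ++ cs.map (pvTrBit '-'), uk ++ cs.map (pvTrBit 'x'),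
       ini ++ cs.map pvTrInit, dep ++ cs.map (pvTrBit 'q')) := by
  induction cs with
  | nil => intro un uk ini dep; simp [masksLoop]
  | cons c cs ih =>
    intro un uk ini dep
    have hc := h c (by simp)
    have htail : ∀ c ∈ cs, c = 'x' ∨ c = '-' ∨ c = 'q' ∨ c = '0' ∨ c = '1' :=
      fun d hd => h d (by simp [hd])
    rcases hc with h1 | h1 | h1 | h1 | h1 <;>
      subst h1 <;>
      simp [masksLoop, ih htail, pvTrInit, pvTrBit]

theorem masks_spec : Claim_equal_masks := by
  intro raw _ hpre
  unfold Spec_masks masks masks_alt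
  have h : ∀ c ∈ raw.toList, c = 'x' ∨ c = '-' ∨ c = 'q' ∨ c = '0' ∨ c = '1' := by
    intro c hc
    have := List.all_eq_true.mp hpre c hc
    simpa using this
  rw [masksLoop_eq raw.toList h]
  by_cases hd : ['0','b'] ++ raw.toList.map (pvTrBit 'q')
      = ['0','b','0','0','0','0','0','0','0','0'] <;>
    simp [hd]
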